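-- pv_equiv track=rewrite | github.com/busebd12/InterviewPreparation | LeetCode/Python/Easy/1758-Minimum-Changes-To-Make-Alternating-Binary-String/solution.py | generate_alternating_string
-- ===== SOURCE A (Python) =====
-- from typing import List
--
-- def generate_alternating_string(n: int, start: chr) -> List[chr]:
--     digits=['$' for _ in range(0, n)]
--
--     digits[0]=start
--
--     for index in range(1, n):
--         if digits[index - 1]=='0':
--             digits[index]='1'
--         else:
--             digits[index]='0'
--
--     return digits
-- ===== SOURCE B (Python) =====
-- def generate_alternating_string(n, start):
--     digits = ['$'] * n
--     digits[0] = start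
--     pat = ['1', '0'] if start == '0' else ['0', '1']
--     digits[1:] = (pat * (n // 2 + 1))[:n - 1]
--     return digits
-- ===== Notes on version B (the rewrite author's own statement) =====
-- stated objective: alternative
-- what changed: B builds the tail by repeating the two-character pattern ('10' or '01') and slice-assigning its first n-1 characters into digits[1:], instead of A's sequential loop that reads the previous element to decide each next one.
import Mathlib
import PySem

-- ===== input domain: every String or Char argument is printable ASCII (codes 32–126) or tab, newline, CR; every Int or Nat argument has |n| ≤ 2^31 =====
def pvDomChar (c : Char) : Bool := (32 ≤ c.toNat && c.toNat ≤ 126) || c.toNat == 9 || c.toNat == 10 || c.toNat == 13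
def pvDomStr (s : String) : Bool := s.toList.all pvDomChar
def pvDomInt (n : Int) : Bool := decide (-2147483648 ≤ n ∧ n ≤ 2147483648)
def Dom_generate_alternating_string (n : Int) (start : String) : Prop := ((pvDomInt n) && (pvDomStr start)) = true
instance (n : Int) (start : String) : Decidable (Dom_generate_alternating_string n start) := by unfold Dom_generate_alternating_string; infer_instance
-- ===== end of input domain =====

-- B replaces A's sequential scan of the previous element by pattern repetition and a
-- slice assignment (objective: alternative decomposition, same cost).

-- ===== PORT A =====
-- the for-loop over range(1, n), reading digits[index-1] and setting digits[index]
def gasLoop (digits : List String) : List Int → List String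
  | [] => digits
  | i :: rest =>
      let v := if (PySem.List.pyGetD digits (i - 1) "$") = "0" then "1" else "0"
      gasLoop (PySem.List.pySetD digits i v) rest

def generate_alternating_string (n : Int) (start : String) : List String :=
  let digits := (PySem.List.pyRange 0 n 1).map (fun _ => "$")
  let digits := PySem.List.pySetD digits 0 start
  gasLoop digits (PySem.List.pyRange 1 n 1)

-- ===== PORT B =====
def generate_alternating_string_alt (n : Int) (start : String) : List String :=
  let digits := List.replicate n.toNat "$"                       -- ['$'] * n
  let digits := PySem.List.pySetD digits 0 start                 -- digits[0] = start
  let pat := if start = "0" then ["1", "0"] else ["0", "1"]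
  let s := PySem.List.slice (List.flatten (List.replicate (PySem.Int.floordiv n 2 + 1).toNat pat)) none (some (n - 1))
  digits.take 1 ++ s                                             -- digits[1:] = (pat*(n//2+1))[:n-1]

-- ===== PRECONDITION & SPEC =====
-- Pre_ excludes n ≤ 0, where both Pythons raise IndexError at digits[0] = start.
def Pre_generate_alternating_string (n : Int) (start : String) : Prop := 1 ≤ n
instance (n : Int) (start : String) : Decidable (Pre_generate_alternating_string n start) := by unfold Pre_generate_alternating_string; infer_instance
def pvWitness_generate_alternating_string : Int × String := (5, "0")

def Spec_generate_alternating_string (n : Int) (start : String) (out : List String) : Prop := out = generate_alternating_string_alt n start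
instance (n : Int) (start : String) (out : List String) : Decidable (Spec_generate_alternating_string n start out) := by unfold Spec_generate_alternating_string; infer_instance

-- ===== CLAIM (what is proved, stated in full; the proofs are below) =====
def Claim_equal_generate_alternating_string : Prop := ∀ (n : Int) (start : String), Dom_generate_alternating_string n start → Pre_generate_alternating_string n start → Spec_generate_alternating_string n start (generate_alternating_string n start)

-- ===== LEMMAS AND PROOFS =====

-- the alternating tail of length r that follows a cell holding c
def gasChain : Nat → String → List String
  | 0, _ => []
  | r + 1, c => (if c = "0" then "1" else "0") :: gasChain r (if c = "0" then "1" else "0")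

theorem gasChain_congr (r : Nat) (c c' : String) (h : (c = "0") ↔ (c' = "0")) :
    gasChain r c = gasChain r c' := by
  induction r generalizing c c' with
  | zero => rfl
  | succ r ih =>
    have hv : (if c = "0" then "1" else "0") = (if c' = "0" then "1" else "0") := by
      by_cases hc : c = "0"
      · simp [hc, h.mp hc]
      · have hc' : ¬ c' = "0" := fun h' => hc (h.mpr h')
        simp [hc, hc']
    simp only [gasChain, hv]

-- A's loop over indices p.length .. p.length+r-1 fills the '$'-suffix with the chain
theorem gasLoop_inv (r : Nat) (p : List String) (hp : p ≠ []) :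
    gasLoop (p ++ List.replicate r "$")
      (PySem.List.pyRange (p.length : Int) ((p.length : Int) + r) 1)
      = p ++ gasChain r (p.getLast hp) := by
  induction r generalizing p with
  | zero =>
    rw [PySem.List.pyRange_one_eq_nil (by omega)]
    simp [gasLoop, gasChain]
  | succ r ih =>
    obtain ⟨q, c, rfl⟩ : ∃ q c, p = q ++ [c] :=
      ⟨p.dropLast, p.getLast hp, (List.dropLast_append_getLast hp).symm⟩
    have hlt : ((q ++ [c]).length : Int) < ((q ++ [c]).length : Int) + (r + 1 : Nat) := by
      push_cast; omega
    rw [PySem.List.pyRange_one_cons hlt]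
    simp only [gasLoop]
    -- the read of digits[index-1] is the last element of the filled prefix
    have hget : PySem.List.pyGetD ((q ++ [c]) ++ List.replicate (r + 1) "$")
        (((q ++ [c]).length : Int) - 1) "$" = c := by
      rw [PySem.List.pyGetD_eq_getElem _ "$" (by push_cast [List.length_append, List.length_cons, List.length_nil]; omega) (by push_cast [List.length_append, List.length_cons, List.length_nil, List.length_replicate]; omega)]
      rw [List.getElem_append_left (by simp)]
      exact List.getElem_concat_length (by simp) _
    rw [hget]
    set v : String := if c = "0" then "1" else "0" with hv
    -- the write digits[index] = v moves the boundary one cell right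
    have hset : PySem.List.pySetD ((q ++ [c]) ++ List.replicate (r + 1) "$")
        (((q ++ [c]).length : Int)) v = ((q ++ [c]) ++ [v]) ++ List.replicate r "$" := by
      rw [PySem.List.pySetD_natCast]
      rw [List.set_append_right _ _ (le_refl _)]
      simp [List.replicate_succ]
    rw [hset]
    have hrange : PySem.List.pyRange (((q ++ [c]).length : Int) + 1)
        (((q ++ [c]).length : Int) + (r + 1 : Nat)) 1
        = PySem.List.pyRange ((((q ++ [c]) ++ [v]).length : Int))
            ((((q ++ [c]) ++ [v]).length : Int) + r) 1 := by
      have e1 : ((((q ++ [c]) ++ [v]).length : Int)) = ((q ++ [c]).length : Int) + 1 := by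
        push_cast [List.length_append, List.length_cons, List.length_nil]; omega
      rw [e1]; congr 1; push_cast; omega
    rw [hrange, ih ((q ++ [c]) ++ [v]) (by simp)]
    rw [List.getLast_append_singleton, List.getLast_append_singleton]
    show _ = (q ++ [c]) ++ gasChain (r + 1) c
    simp only [gasChain, ← hv, List.append_assoc, List.singleton_append]
    simp

-- take r of the repeated two-character pattern is the chain from c
theorem gasTake (k r : Nat) (c : String) (h : r ≤ 2 * k) :
    List.take r (List.flatten (List.replicate k (if c = "0" then ["1", "0"] else ["0", "1"])))
      = gasChain r c := by
  induction k generalizing r c with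
  | zero =>
    have : r = 0 := by omega
    subst this; rfl
  | succ k ih =>
    have hpat : (if c = "0" then ["1", "0"] else ["0", "1"])
        = [(if c = "0" then "1" else "0"),
           (if (if c = "0" then "1" else "0") = "0" then "1" else "0")] := by
      by_cases hc : c = "0" <;> simp [hc]
    rw [List.replicate_succ, List.flatten_cons]
    match r with
    | 0 => rfl
    | 1 =>
      rw [hpat]; simp [gasChain]
    | r + 2 =>
      rw [hpat]
      simp only [List.cons_append, List.take_succ_cons, List.nil_append]
      rw [← hpat, ih r c (by omega)]
      show _ = gasChain (r + 1 + 1) c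
      simp only [gasChain]
      congr 1
      congr 1
      exact gasChain_congr r c _ (by by_cases hc : c = "0" <;> simp [hc])

-- A evaluates to start followed by the chain
theorem gasA (n : Int) (start : String) (h : 1 ≤ n) :
    generate_alternating_string n start = start :: gasChain (n.toNat - 1) start := by
  unfold generate_alternating_string
  have hmap : (PySem.List.pyRange 0 n 1).map (fun _ => "$") = List.replicate n.toNat "$" := by
    rw [List.map_const']
    congr 1
    simp [PySem.List.length_pyRange_one]
  simp only [hmap]
  obtain ⟨r, hr⟩ : ∃ r : Nat, n.toNat = r + 1 := ⟨n.toNat - 1, by omega⟩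
  rw [hr]
  have hset : PySem.List.pySetD (List.replicate (r + 1) "$") (0 : Int) start
      = [start] ++ List.replicate r "$" := by
    have h0 : (0 : Int) = ((0 : Nat) : Int) := rfl
    rw [h0, PySem.List.pySetD_natCast]
    simp [List.replicate_succ]
  rw [hset]
  have hrange : PySem.List.pyRange 1 n 1
      = PySem.List.pyRange (([start] : List String).length : Int)
          ((([start] : List String).length : Int) + r) 1 := by
    have e1 : (([start] : List String).length : Int) = 1 := by simp
    rw [e1]; congr 1; omega
  rw [hrange, gasLoop_inv r [start] (by simp)]
  simp

-- B evaluates to the same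
theorem gasB (n : Int) (start : String) (h : 1 ≤ n) :
    generate_alternating_string_alt n start = start :: gasChain (n.toNat - 1) start := by
  unfold generate_alternating_string_alt
  have hset : PySem.List.pySetD (List.replicate n.toNat "$") (0 : Int) start
      = start :: List.replicate (n.toNat - 1) "$" := by
    have h0 : (0 : Int) = ((0 : Nat) : Int) := rfl
    rw [h0, PySem.List.pySetD_natCast]
    obtain ⟨r, hr⟩ : ∃ r : Nat, n.toNat = r + 1 := ⟨n.toNat - 1, by omega⟩
    rw [hr]; simp [List.replicate_succ]
  simp only [hset]
  have hdiv : n.toNat - 1 ≤ 2 * (PySem.Int.floordiv n 2 + 1).toNat := by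
    rw [PySem.Int.floordiv_eq_ediv_of_pos (by omega)]
    omega
  rw [PySem.List.slice_to _ (by omega)]
  have hnt : (n - 1).toNat = n.toNat - 1 := by omega
  rw [hnt, gasTake _ _ start hdiv]
  simp

-- ===== VERDICT (by name: the statement is the Claim_ definition above) =====
theorem generate_alternating_string_spec : Claim_equal_generate_alternating_string := by
  intro n start _ hpre
  unfold Spec_generate_alternating_string
  rw [gasA n start hpre, gasB n start hpre]
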